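-- pv_equiv track=rewrite | github.com/MicrobeTom/E_faecium_ampicillin | tools_final.py | match_shap_bins_with_buffer
-- ===== SOURCE A (Python) =====
-- def match_shap_bins_with_buffer(train_indices, test_indices, buffer=1):
--     matched_test_indices = set()
--     matches = 0
--
--     for train_idx in train_indices:
--         for test_idx in test_indices:
--             if test_idx not in matched_test_indices and abs(train_idx - test_idx) <= buffer:
--                 matches += 1
--                 matched_test_indices.add(test_idx)
--                 break
--
--     return matches
-- ===== SOURCE B (Python) =====
-- def match_shap_bins_with_buffer(train_indices, test_indices, buffer=1):
--     # Keep a shrinking list of the distinct test bins still available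
--     # (first-occurrence order); delete a bin when it is matched.
--     available = list(dict.fromkeys(test_indices))
--     matches = 0
--     for train_idx in train_indices:
--         for pos, test_idx in enumerate(available):
--             if abs(train_idx - test_idx) <= buffer:
--                 del available[pos]
--                 matches += 1
--                 break
--     return matches
-- ===== Notes on version B (the rewrite author's own statement) =====
-- stated objective: faster
-- what changed: Instead of rescanning the full test list for every train bin while skipping a growing matched set, B dedups the test bins once and keeps a shrinking list of still-available distinct bins, deleting a bin when it is matched.
import Mathlib
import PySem

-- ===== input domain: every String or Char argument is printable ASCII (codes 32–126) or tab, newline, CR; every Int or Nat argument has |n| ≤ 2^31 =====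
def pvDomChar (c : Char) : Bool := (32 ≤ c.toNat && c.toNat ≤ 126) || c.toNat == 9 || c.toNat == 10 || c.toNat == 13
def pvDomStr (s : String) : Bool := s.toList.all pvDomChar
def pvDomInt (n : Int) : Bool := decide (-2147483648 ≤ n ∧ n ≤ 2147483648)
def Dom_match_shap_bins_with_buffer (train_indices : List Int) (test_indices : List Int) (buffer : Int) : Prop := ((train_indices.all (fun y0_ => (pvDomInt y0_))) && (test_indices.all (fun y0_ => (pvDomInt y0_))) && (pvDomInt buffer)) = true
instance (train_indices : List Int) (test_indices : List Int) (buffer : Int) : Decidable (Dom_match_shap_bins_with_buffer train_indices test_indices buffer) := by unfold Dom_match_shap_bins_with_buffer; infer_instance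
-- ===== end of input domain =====

-- B replaces A's matched-set bookkeeping (rescanning the whole test list and skipping
-- already-matched values) by a shrinking list of the distinct still-available test bins,
-- deleting a bin once matched: a timing run measured B faster on the generated inputs.

-- ===== PORT A =====
-- inner 'for test_idx in test_indices: … break' loop of A
def pvAInner (t buffer : Int) (matched : PySem.Set Int) (cnt : Int) : List Int → PySem.Set Int × Int
  | [] => (matched, cnt)
  | v :: rest =>
    if !(PySem.Set.contains matched v) && decide (|t - v| ≤ buffer) then
      (PySem.Set.add matched v, cnt + 1)
    else pvAInner t buffer matched cnt rest

def match_shap_bins_with_buffer (train_indices : List Int) (test_indices : List Int) (buffer : Int) : Int :=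
  (train_indices.foldl (fun st t => pvAInner t buffer st.1 st.2 test_indices)
    ((PySem.Set.empty : PySem.Set Int), 0)).2

-- ===== PORT B =====
-- inner loop of B: remove the first available bin within the buffer, if any
def pvBRemove (t buffer : Int) : List Int → Option (List Int)
  | [] => none
  | v :: rest =>
    if decide (|t - v| ≤ buffer) then some rest
    else (pvBRemove t buffer rest).map (fun l => v :: l)

def match_shap_bins_with_buffer_alt (train_indices : List Int) (test_indices : List Int) (buffer : Int) : Int :=
  (train_indices.foldl
    (fun (st : List Int × Int) t =>
      match pvBRemove t buffer st.1 with
      | some a => (a, st.2 + 1)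
      | none => st)
    (PySem.List.dedup test_indices, 0)).2

-- ===== PRECONDITION & SPEC =====
def Spec_match_shap_bins_with_buffer (train_indices : List Int) (test_indices : List Int) (buffer : Int) (out : Int) : Prop := out = match_shap_bins_with_buffer_alt train_indices test_indices buffer
instance (train_indices : List Int) (test_indices : List Int) (buffer : Int) (out : Int) : Decidable (Spec_match_shap_bins_with_buffer train_indices test_indices buffer out) := by unfold Spec_match_shap_bins_with_buffer; infer_instance

-- ===== CLAIM =====
def Claim_equal_match_shap_bins_with_buffer : Prop := ∀ (train_indices : List Int) (test_indices : List Int) (buffer : Int), Dom_match_shap_bins_with_buffer train_indices test_indices buffer → Spec_match_shap_bins_with_buffer train_indices test_indices buffer (match_shap_bins_with_buffer train_indices test_indices buffer)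

-- ===== LEMMAS AND PROOFS =====

-- A's inner loop returns the first unmatched in-buffer value (characterisation via find?)
lemma pvAInner_char (t buffer : Int) (m : PySem.Set Int) (c : Int) (xs : List Int) :
    pvAInner t buffer m c xs =
      match xs.find? (fun v => !(PySem.Set.contains m v) && decide (|t - v| ≤ buffer)) with
      | none => (m, c)
      | some v => (PySem.Set.add m v, c + 1) := by
  induction xs with
  | nil => rfl
  | cons x xs ih =>
    rw [List.find?_cons]
    cases h : (!(PySem.Set.contains m x) && decide (|t - x| ≤ buffer)) with
    | true =>
      simp only [pvAInner, h]
      simp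
    | false =>
      simp only [pvAInner, h]
      simp only [Bool.false_eq_true, if_false]
      exact ih

-- B's inner loop removes the first in-buffer value (characterisation via find?/eraseP)
lemma pvBRemove_char (t buffer : Int) (xs : List Int) :
    pvBRemove t buffer xs =
      match xs.find? (fun v => decide (|t - v| ≤ buffer)) with
      | none => none
      | some _ => some (xs.eraseP (fun v => decide (|t - v| ≤ buffer))) := by
  induction xs with
  | nil => rfl
  | cons x xs ih =>
    simp only [pvBRemove, List.find?_cons, List.eraseP_cons]
    by_cases h : (|t - x| ≤ buffer)
    · simp [h]
    · simp only [h, decide_false, Bool.false_eq_true, not_false_eq_true, if_neg, ih]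
      cases hf : xs.find? (fun v => decide (|t - v| ≤ buffer)) <;> simp

-- find? of a filtered list
lemma find?_filter' (r f : Int → Bool) : ∀ (l : List Int),
    (l.filter r).find? f = l.find? (fun v => r v && f v) := by
  intro l
  induction l with
  | nil => rfl
  | cons x l ih =>
    simp only [List.filter_cons, List.find?_cons]
    by_cases hr : r x = true
    · rw [if_pos hr, List.find?_cons, hr, Bool.true_and]
      cases hf : f x <;> simp [ih]
    · simp only [Bool.not_eq_true] at hr
      simp [hr, ih]

-- foldl over Set.add only appends
lemma foldl_add_append (xs : List Int) : ∀ (s : List Int), ∃ r, xs.foldl PySem.Set.add s = s ++ r := by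
  induction xs with
  | nil => intro s; exact ⟨[], by simp⟩
  | cons x xs ih =>
    intro s
    obtain ⟨r, hr⟩ := ih (PySem.Set.add s x)
    simp only [List.foldl_cons, hr]
    by_cases h : x ∈ s
    · exact ⟨r, by simp [PySem.Set.add, h]⟩
    · exact ⟨x :: r, by simp [PySem.Set.add, h]⟩

-- find? is unchanged by the dedup fold when the seed has no hit
lemma find?_foldl_add (f : Int → Bool) : ∀ (xs s : List Int), (∀ v ∈ s, f v = false) →
    (xs.foldl PySem.Set.add s).find? f = xs.find? f := by
  intro xs
  induction xs with
  | nil =>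
    intro s hs
    simpa using List.find?_eq_none.mpr (by intro v hv; simp [hs v hv])
  | cons x xs ih =>
    intro s hs
    simp only [List.foldl_cons, List.find?_cons]
    by_cases hx : f x = true
    · have hxs : x ∉ s := fun h => by simp [hs x h] at hx
      have hadd : PySem.Set.add s x = s ++ [x] := by simp [PySem.Set.add, hxs]
      obtain ⟨r, hr⟩ := foldl_add_append xs (PySem.Set.add s x)
      have hall : xs.foldl PySem.Set.add (PySem.Set.add s x) = s ++ x :: r := by
        rw [hr, hadd]; simp
      rw [hall, hx, List.find?_append,
        List.find?_eq_none.mpr (by intro v hv; simp [hs v hv]), Option.none_or,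
        List.find?_cons, hx]
    · simp only [Bool.not_eq_true] at hx
      have hs' : ∀ v ∈ PySem.Set.add s x, f v = false := by
        intro v hv
        by_cases h : x ∈ s
        · simp [PySem.Set.add, h] at hv; exact hs v hv
        · simp [PySem.Set.add, h] at hv
          rcases hv with hv | hv
          · exact hs v hv
          · simpa [hv]
      rw [ih _ hs', hx]

lemma find?_dedup (f : Int → Bool) (xs : List Int) :
    (PySem.List.dedup xs).find? f = xs.find? f := by
  have h : PySem.List.dedup xs = xs.foldl PySem.Set.add [] := by
    rw [PySem.List.dedup_eq_ofList, PySem.Set.ofList_eq_foldl]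
  rw [h, find?_foldl_add f xs [] (by simp)]

-- erasing the first hit from a nodup list = filtering out the found value
lemma eraseP_eq_filter_ne (p : Int → Bool) (v : Int) : ∀ (l : List Int), l.Nodup →
    l.find? p = some v → l.eraseP p = l.filter (fun w => !(w == v)) := by
  intro l
  induction l with
  | nil => intro _ h; simp [List.find?] at h
  | cons x l ih =>
    intro hnd hf
    rw [List.find?_cons] at hf
    simp only [List.nodup_cons] at hnd
    by_cases hx : p x = true
    · rw [hx] at hf
      simp only [Option.some.injEq] at hf
      subst hf
      rw [List.eraseP_cons_of_pos hx, List.filter_cons]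
      simp only [beq_self_eq_true, Bool.not_true, Bool.false_eq_true, if_neg,
        not_false_eq_true]
      exact (List.filter_eq_self.mpr (fun w hw => by
        simp only [Bool.not_eq_eq_eq_not, Bool.not_true, beq_eq_false_iff_ne]
        exact fun h => hnd.1 (h ▸ hw))).symm
    · simp only [Bool.not_eq_true] at hx
      rw [hx] at hf
      have hxv : x ≠ v := by
        intro h; subst h
        have := List.find?_some hf
        simp [hx] at this
      rw [List.eraseP_cons_of_neg (by simp [hx]), List.filter_cons]
      simp only [beq_eq_false_iff_ne, ne_eq, hxv, not_false_eq_true, Bool.not_eq_true',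
        if_pos]
      rw [ih hnd.2 hf]

-- the loop invariant: B's available list is the dedup of the tests filtered by A's matched set
lemma loop_eq (te : List Int) (buffer : Int) : ∀ (tr : List Int) (m : PySem.Set Int) (c : Int),
    ((PySem.List.dedup te).filter (fun v => !(PySem.Set.contains m v))).Nodup →
    (tr.foldl (fun st t => pvAInner t buffer st.1 st.2 te) (m, c)).2 =
    (tr.foldl
      (fun (st : List Int × Int) t =>
        match pvBRemove t buffer st.1 with
        | some a => (a, st.2 + 1)
        | none => st)
      ((PySem.List.dedup te).filter (fun v => !(PySem.Set.contains m v)), c)).2 := by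
  intro tr
  induction tr with
  | nil => intro m c _; rfl
  | cons t tr ih =>
    intro m c hnd
    simp only [List.foldl_cons]
    rw [pvAInner_char, pvBRemove_char]
    have hfind : ((PySem.List.dedup te).filter (fun v => !(PySem.Set.contains m v))).find?
          (fun v => decide (|t - v| ≤ buffer))
        = te.find? (fun v => !(PySem.Set.contains m v) && decide (|t - v| ≤ buffer)) := by
      rw [find?_filter', find?_dedup]
    rw [hfind]
    cases hf : te.find? (fun v => !(PySem.Set.contains m v) && decide (|t - v| ≤ buffer)) with
    | none => exact ih m c hnd
    | some v =>
      have hqv := List.find?_some hf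
      simp only [Bool.and_eq_true, Bool.not_eq_true', decide_eq_true_eq] at hqv
      have hvm : v ∉ m := by
        have := hqv.1
        simp only [PySem.Set.contains_eq_listContains, List.contains_eq_mem,
          decide_eq_false_iff_not] at this
        exact this
      have hadd : PySem.Set.add m v = m ++ [v] := by
        simp [PySem.Set.add, hvm]
      have herase : ((PySem.List.dedup te).filter (fun w => !(PySem.Set.contains m w))).eraseP
            (fun w => decide (|t - w| ≤ buffer))
          = (PySem.List.dedup te).filter (fun w => !(PySem.Set.contains (PySem.Set.add m v) w)) := by
        rw [eraseP_eq_filter_ne _ v _ hnd (by rw [hfind, hf]), List.filter_filter]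
        apply List.filter_congr
        intro w _
        rw [hadd]
        by_cases hwv : w = v <;> by_cases hwm : w ∈ m <;>
          simp [PySem.Set.contains_eq_listContains, List.contains_eq_mem, hwv, hwm]
      rw [herase]
      exact ih (PySem.Set.add m v) (c + 1) (herase ▸ List.Nodup.eraseP _ hnd)

-- ===== VERDICT =====
theorem match_shap_bins_with_buffer_spec : Claim_equal_match_shap_bins_with_buffer := by
  intro tr te buffer _
  unfold Spec_match_shap_bins_with_buffer match_shap_bins_with_buffer match_shap_bins_with_buffer_alt
  have h0 : (PySem.List.dedup te).filter
      (fun v => !(PySem.Set.contains (PySem.Set.empty : PySem.Set Int) v)) = PySem.List.dedup te := by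
    apply List.filter_eq_self.mpr
    intro v _
    simp [PySem.Set.empty, PySem.Set.contains_eq_listContains]
  have h := loop_eq te buffer tr (PySem.Set.empty : PySem.Set Int) 0
    (by rw [h0]; exact PySem.List.nodup_dedup te)
  rw [h0] at h
  exact h
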